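-- pv_equiv track=rewrite | github.com/DPNT-Sourcecode/CHK-ruak01 | lib/solutions/CHK/checkout_solution.py | collateItemAmounts
-- ===== SOURCE A (Python) =====
-- def collateItemAmounts(skus, single_items):
--     item_amounts = {}
--
--     for item in skus:
--         # Not in the basket
--         if not item in single_items:
--             return -1
--
--         # Add item to the item amounts, or increment
--         if item in item_amounts:
--             item_amounts[item] = item_amounts[item] + 1
--         else:
--             item_amounts[item] = 1
--     return item_amounts
-- ===== SOURCE B (Python) =====
-- def collateItemAmounts(skus, single_items):
--     # Two passes: validate everything first, then count each distinct sku with str.count.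
--     if any(item not in single_items for item in skus):
--         return -1
--     return {item: skus.count(item) for item in dict.fromkeys(skus)}
-- ===== Notes on version B (the rewrite author's own statement) =====
-- stated objective: simpler
-- what changed: A's single fused loop that validates each sku and increments a hand-maintained dict is replaced by two separate shaped passes: an any() validation pass, then a dict comprehension over the distinct skus (dict.fromkeys) counting each with str.count.
-- outside the precondition, e.g. on collateItemAmounts('X', set()): A returns -1, B returns -1
import Mathlib
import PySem

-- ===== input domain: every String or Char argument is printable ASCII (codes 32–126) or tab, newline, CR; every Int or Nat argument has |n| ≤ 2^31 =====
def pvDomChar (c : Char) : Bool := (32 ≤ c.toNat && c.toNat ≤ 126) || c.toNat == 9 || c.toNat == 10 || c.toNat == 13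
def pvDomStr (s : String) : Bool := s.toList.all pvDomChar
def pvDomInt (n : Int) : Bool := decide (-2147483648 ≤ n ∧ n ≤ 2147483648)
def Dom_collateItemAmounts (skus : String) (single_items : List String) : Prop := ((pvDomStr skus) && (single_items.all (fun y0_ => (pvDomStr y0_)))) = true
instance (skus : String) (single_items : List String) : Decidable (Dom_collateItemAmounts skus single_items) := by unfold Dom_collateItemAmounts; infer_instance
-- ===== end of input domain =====

-- B replaces A's fused validate-and-increment loop by two separate passes (validate all, then count
-- each distinct sku with str.count); objective: simpler decomposition, no speed claim.

-- ===== PORT A =====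
-- A's loop with early 'return -1'; the 'none' result stands for Python's -1 (not a dict), excluded by Pre_.
def collateAuxA (items : List Char) (single_items : List String) (d : PySem.Dict String Int) :
    Option (PySem.Dict String Int) :=
  match items with
  | [] => some d
  | c :: rest =>
    let s := String.ofList [c]
    if !(single_items.contains s) then none
    else
      collateAuxA rest single_items
        (if d.contains s then d.insert s (d.getD s 0 + 1) else d.insert s 1)

def collateItemAmounts (skus : String) (single_items : List String) : List (String × Int) :=
  match collateAuxA skus.toList single_items PySem.Dict.empty with
  | some d => d.items
  | none => []   -- Python returns -1 here (not a dict); outside Pre_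

-- ===== PORT B =====
def collateItemAmounts_alt (skus : String) (single_items : List String) : List (String × Int) :=
  let strs := skus.toList.map (fun c => String.ofList [c])
  if strs.any (fun s => !(single_items.contains s)) then []  -- Python returns -1; outside Pre_
  else (PySem.List.dedup strs).map (fun s => (s, (strs.count s : Int)))

-- ===== PRECONDITION & SPEC =====
-- Pre_ excludes skus containing an item absent from single_items: there Python A (and B) return
-- the int -1, which is not a value of the declared dict type.
def Pre_collateItemAmounts (skus : String) (single_items : List String) : Prop :=
  skus.toList.all (fun c => single_items.contains (String.ofList [c])) = true
instance (skus : String) (single_items : List String) : Decidable (Pre_collateItemAmounts skus single_items) := by unfold Pre_collateItemAmounts; infer_instance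

def pvWitness_collateItemAmounts : String × List String := ("AAB", ["A", "B", "C"])

def Spec_collateItemAmounts (skus : String) (single_items : List String) (out : List (String × Int)) : Prop := out = collateItemAmounts_alt skus single_items
instance (skus : String) (single_items : List String) (out : List (String × Int)) : Decidable (Spec_collateItemAmounts skus single_items out) := by unfold Spec_collateItemAmounts; infer_instance

-- ===== CLAIM (what is proved, stated in full; the proofs are below) =====
def Claim_equal_collateItemAmounts : Prop := ∀ (skus : String) (single_items : List String), Dom_collateItemAmounts skus single_items → Pre_collateItemAmounts skus single_items → Spec_collateItemAmounts skus single_items (collateItemAmounts skus single_items)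

-- ===== LEMMAS AND PROOFS =====

-- When every item is known, A's aux never hits the early return and its branchy increment
-- is the canonical counter step.
theorem collateAuxA_all_valid (items : List Char) (single_items : List String)
    (d : PySem.Dict String Int)
    (h : items.all (fun c => single_items.contains (String.ofList [c])) = true) :
    collateAuxA items single_items d =
      some (items.foldl (fun d c => d.insert (String.ofList [c]) (d.getD (String.ofList [c]) 0 + 1)) d) := by
  induction items generalizing d with
  | nil => rfl
  | cons c rest ih =>
    simp only [List.all_cons, Bool.and_eq_true] at h
    rw [collateAuxA]
    simp only [h.1, Bool.not_true, Bool.false_eq_true, if_false, List.foldl_cons]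
    rw [ih _ h.2]
    congr 1
    by_cases hc : d.contains (String.ofList [c])
    · simp [hc]
    · simp only [Bool.not_eq_true] at hc
      simp [hc, PySem.Dict.getD_of_not_contains d 0 hc]

-- ===== VERDICT (by name: the statement is the Claim_ definition above) =====

theorem collateItemAmounts_spec : Claim_equal_collateItemAmounts := by
  intro skus single_items _ hpre
  unfold Spec_collateItemAmounts collateItemAmounts collateItemAmounts_alt
  rw [collateAuxA_all_valid _ _ _ hpre]
  have hany : (skus.toList.map (fun c => String.ofList [c])).any
      (fun s => !(single_items.contains s)) = false := by
    simp only [List.any_map, List.any_eq_false, Function.comp]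
    intro c hc
    simp only [Pre_collateItemAmounts, List.all_eq_true] at hpre
    simpa using hpre c hc
  simp only [hany, Bool.false_eq_true, if_false]
  have hfm := List.foldl_map (f := fun c => String.ofList [c])
    (g := fun (d : PySem.Dict String Int) s => d.insert s (d.getD s 0 + 1))
    (l := skus.toList) (init := PySem.Dict.empty)
  rw [← hfm]
  rw [PySem.Dict.foldl_insert_getD_add_one_eq_counter]
  rw [PySem.Dict.items_counter, PySem.List.dedup_eq_ofList]
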